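-- pv_equiv track=rewrite | github.com/PermutaTriangle/comb_spec_searcher | atrapv2/strategies/batch_strategies/binary_pattern_strategies/util.py | filter_maximal
-- ===== SOURCE A (Python) =====
-- def filter_maximal(patts):
--     last = None
--     maximal = list()
--     for cur in sorted(patts):
--         if cur == last:
--             continue
--         add = True
--         for other in patts:
--             if is_subset(cur, other) and cur != other:
--                 add = False
--         if add:
--             maximal.append(cur)
--         last = cur
--     return maximal
--
-- def is_subset(a, b):
--     return (a & ~b) == 0
-- ===== SOURCE B (Python) =====
-- def is_subset(a, b):
--     return (a & ~b) == 0
--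
--
-- def filter_maximal(patts):
--     # Process distinct patterns in an order in which every strict superset of a
--     # pattern comes AFTER it (nonnegatives ascending, then negatives ascending:
--     # within a sign class a strict subset is numerically smaller, and a
--     # nonnegative can be a strict subset of a negative but never conversely).
--     # Appending a pattern then evicts any previously kept strict subset of it,
--     # so what survives is exactly the subset-maximal patterns.
--     s = set(patts)
--     nonneg = sorted(x for x in s if x >= 0)
--     neg = sorted(x for x in s if x < 0)
--     maximal = []
--     for cur in nonneg + neg:
--         maximal = [m for m in maximal if not (is_subset(m, cur) and m != cur)]
--         maximal.append(cur)
--     return sorted(maximal)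
-- ===== Notes on version B (the rewrite author's own statement) =====
-- stated objective: faster
-- what changed: Instead of A's check of every sorted candidate against the whole input list, B dedups into a set, processes the distinct patterns in a superset-compatible order (nonnegatives ascending, then negatives ascending) while a greedy pass keeps only a list of current maximal patterns and evicts previously kept strict subsets, then sorts the survivors.
import Mathlib
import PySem

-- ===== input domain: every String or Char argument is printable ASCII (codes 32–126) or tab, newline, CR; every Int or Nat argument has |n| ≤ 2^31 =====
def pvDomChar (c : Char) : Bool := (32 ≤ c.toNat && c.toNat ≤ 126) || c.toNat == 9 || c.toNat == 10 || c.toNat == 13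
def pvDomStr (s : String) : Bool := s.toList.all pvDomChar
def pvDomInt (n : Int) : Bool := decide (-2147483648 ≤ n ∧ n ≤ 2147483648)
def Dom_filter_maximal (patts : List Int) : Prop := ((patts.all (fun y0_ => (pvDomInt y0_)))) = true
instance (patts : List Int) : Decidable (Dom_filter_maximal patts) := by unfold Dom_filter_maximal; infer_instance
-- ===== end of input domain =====

-- B replaces A's scan of every candidate against the whole input with a dedup + superset-compatible
-- order + greedy eviction pass over the maintained maximal list (measured faster); same return value.


-- ===== PORT A =====
-- is_subset(a, b) = (a & ~b) == 0
def pyIsSubset (a b : Int) : Bool := PySem.Int.band a (Int.not b) == 0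

def filter_maximal (patts : List Int) : List Int :=
  ((PySem.List.sorted patts (fun x => x) false).foldl
    (fun st cur =>
      if some cur = st.1 then st
      else
        let add := patts.foldl
          (fun add other => if pyIsSubset cur other && cur != other then false else add) true
        (some cur, if add then st.2 ++ [cur] else st.2))
    (none, [])).2

-- ===== PORT B =====
def filter_maximal_alt (patts : List Int) : List Int :=
  let s := PySem.Set.ofList patts
  let nonneg := PySem.List.sorted (s.filter (fun x => decide (0 ≤ x))) (fun x => x) false
  let neg := PySem.List.sorted (s.filter (fun x => decide (x < 0))) (fun x => x) false
  let maximal := (nonneg ++ neg).foldl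
    (fun maximal cur =>
      (maximal.filter (fun m => !(pyIsSubset m cur && m != cur))) ++ [cur]) []
  PySem.List.sorted maximal (fun x => x) false

-- ===== PRECONDITION & SPEC =====
def Spec_filter_maximal (patts : List Int) (out : List Int) : Prop := out = filter_maximal_alt patts
instance (patts : List Int) (out : List Int) : Decidable (Spec_filter_maximal patts out) := by unfold Spec_filter_maximal; infer_instance

-- ===== CLAIM (what is proved, stated in full; the proofs are below) =====
def Claim_equal_filter_maximal : Prop := ∀ (patts : List Int), Dom_filter_maximal patts → Spec_filter_maximal patts (filter_maximal patts)

-- ===== LEMMAS AND PROOFS =====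

-- the shared "keep cur" predicate: cur is not a strict subset of any element of patts
def maxB (patts : List Int) (cur : Int) : Bool :=
  patts.all (fun other => !(pyIsSubset cur other && cur != other))

-- A's adjacent-duplicate skip, extracted
def dedupRun (last : Option Int) : List Int → List Int
  | [] => []
  | x :: xs => if some x = last then dedupRun last xs else x :: dedupRun (some x) xs

-- ~b = -b-1
theorem int_not_eq (b : Int) : Int.not b = -b - 1 := by
  cases b with
  | ofNat n => simp [Int.not, Int.negSucc_eq]; ring
  | negSucc n => simp only [Int.not, Int.negSucc_eq, Int.ofNat_eq_natCast]; omega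

-- bitwise-subset implies ≤ among nonnegatives
theorem subset_le_nonneg {a b : Int} (ha : 0 ≤ a) (hb : 0 ≤ b)
    (h : PySem.Int.band a (Int.not b) = 0) : a ≤ b := by
  rw [int_not_eq] at h
  unfold PySem.Int.band at h
  rw [if_pos ha, if_neg (by omega)] at h
  have h2 : a.toNat - (a.toNat &&& (-(-b - 1) - 1).toNat) = 0 := by exact_mod_cast h
  have h3 : (-(-b - 1) - 1).toNat = b.toNat := by omega
  rw [h3] at h2
  have h4 : a.toNat &&& b.toNat ≤ b.toNat := Nat.and_le_right
  omega

-- bitwise-subset implies ≤ among negatives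
theorem subset_le_neg {a b : Int} (ha : a < 0) (hb : b < 0)
    (h : PySem.Int.band a (Int.not b) = 0) : a ≤ b := by
  rw [int_not_eq] at h
  unfold PySem.Int.band at h
  rw [if_neg (by omega), if_pos (by omega)] at h
  have h2 : (-b - 1).toNat - ((-b - 1).toNat &&& (-a - 1).toNat) = 0 := by exact_mod_cast h
  have h4 : (-b - 1).toNat &&& (-a - 1).toNat ≤ (-a - 1).toNat := Nat.and_le_right
  omega

-- a negative is never a bitwise subset of a nonnegative
theorem neg_not_subset_nonneg {a b : Int} (ha : a < 0) (hb : 0 ≤ b) :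
    PySem.Int.band a (Int.not b) ≠ 0 := by
  rw [int_not_eq]
  unfold PySem.Int.band
  rw [if_neg (by omega), if_neg (by omega)]
  omega

-- A's inner for-loop over patts computes the all-quantified flag
theorem foldl_flag (cur : Int) : ∀ (L : List Int) (b : Bool),
    L.foldl (fun add other => if pyIsSubset cur other && cur != other then false else add) b
      = (b && L.all (fun other => !(pyIsSubset cur other && cur != other))) := by
  intro L
  induction L with
  | nil => simp
  | cons x xs ih =>
    intro b
    simp only [List.foldl_cons, List.all_cons, ih]
    by_cases h : (pyIsSubset cur x && cur != x) = true
    · simp [h]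
    · simp [h]

-- A's outer loop, characterised: it filters the duplicate-skipped list by maxB
theorem foldA (patts : List Int) : ∀ (L : List Int) (last : Option Int) (acc : List Int),
    (L.foldl
      (fun st cur =>
        if some cur = st.1 then st
        else
          let add := patts.foldl
            (fun add other => if pyIsSubset cur other && cur != other then false else add) true
          (some cur, if add then st.2 ++ [cur] else st.2))
      (last, acc)).2 = acc ++ (dedupRun last L).filter (maxB patts) := by
  intro L
  induction L with
  | nil => simp [dedupRun]
  | cons x xs ih =>
    intro last acc
    show (xs.foldl
      (fun st cur =>
        if some cur = st.1 then st
        else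
          let add := patts.foldl
            (fun add other => if pyIsSubset cur other && cur != other then false else add) true
          (some cur, if add then st.2 ++ [cur] else st.2))
      (if some x = last then (last, acc)
       else
         let add := patts.foldl
           (fun add other => if pyIsSubset x other && x != other then false else add) true
         (some x, if add then acc ++ [x] else acc))).2 = _
    by_cases h : some x = last
    · rw [if_pos h, ih, dedupRun, if_pos h]
    · rw [if_neg h, foldl_flag]
      show (xs.foldl
        (fun st cur =>
          if some cur = st.1 then st
          else
            let add := patts.foldl
              (fun add other => if pyIsSubset cur other && cur != other then false else add) true
            (some cur, if add then st.2 ++ [cur] else st.2))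
        ((some x : Option Int), if maxB patts x then acc ++ [x] else acc)).2 = _
      rw [ih, dedupRun, if_neg h, List.filter_cons]
      by_cases hm : maxB patts x = true
      · rw [if_pos hm, hm, if_pos rfl]
        simp [List.append_assoc]
      · rw [if_neg hm, Bool.eq_false_iff.mpr hm, if_neg (by simp)]

-- the duplicate-skipped version of a ≤-sorted list: strictly increasing, membership = "∈ L and ≠ last"
theorem dedupRun_spec : ∀ (L : List Int) (last : Option Int),
    L.Pairwise (· ≤ ·) → (∀ l, last = some l → ∀ y ∈ L, l ≤ y) →
    (dedupRun last L).Pairwise (· < ·) ∧ (∀ x, x ∈ dedupRun last L ↔ x ∈ L ∧ some x ≠ last) := by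
  intro L
  induction L with
  | nil => intro last _ _; simp [dedupRun]
  | cons a xs ih =>
    intro last hpw hlast
    have hax : ∀ y ∈ xs, a ≤ y := (List.pairwise_cons.mp hpw).1
    have hpw' := (List.pairwise_cons.mp hpw).2
    by_cases h : some a = last
    · have ⟨hP, hM⟩ := ih last hpw' (by intro l hl y hy; exact hlast l hl y (List.mem_cons_of_mem _ hy))
      rw [dedupRun, if_pos h]
      refine ⟨hP, fun x => ?_⟩
      rw [hM x]
      constructor
      · rintro ⟨hx, hne⟩; exact ⟨List.mem_cons_of_mem _ hx, hne⟩
      · rintro ⟨hx, hne⟩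
        rcases List.mem_cons.mp hx with rfl | hx
        · exact absurd h hne
        · exact ⟨hx, hne⟩
    · have ⟨hP, hM⟩ := ih (some a) hpw'
        (by
          intro l hl y hy
          have h2 : a = l := by injection hl with h2
          rw [← h2]; exact hax y hy)
      rw [dedupRun, if_neg h]
      constructor
      · refine List.pairwise_cons.mpr ⟨?_, hP⟩
        intro y hy
        have := (hM y).mp hy
        have h1 := hax y this.1
        have h2 : y ≠ a := fun he => this.2 (by rw [he])
        omega
      · intro x
        simp only [List.mem_cons, hM x]
        constructor
        · rintro (rfl | ⟨hx, hne⟩)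
          · exact ⟨Or.inl rfl, h⟩
          · refine ⟨Or.inr hx, ?_⟩
            intro hc
            -- x ∈ xs and some x = last; but then a ≠ last forces l < a ≤ x, contradiction
            obtain ⟨l, hl⟩ : ∃ l, last = some l := by
              cases last with
              | none => exact absurd hc (by simp)
              | some l => exact ⟨l, rfl⟩
            have hla : l ≤ a := hlast l hl a (List.mem_cons_self)
            have hlx : some x = some l := by rw [hc, hl]
            have hx2 : x = l := by injection hlx
            have hax2 : a ≤ x := hax x hx
            have hne2 : a ≠ l := by intro hh; exact h (by rw [hl, hh])
            omega
        · rintro ⟨rfl | hx, hne⟩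
          · exact Or.inl rfl
          · by_cases hxa : x = a
            · exact Or.inl hxa
            · exact Or.inr ⟨hx, by simpa using hxa⟩

-- B's greedy eviction pass over a superset-compatible order keeps exactly the maximal elements
theorem greedy_spec : ∀ (T : List Int),
    T.Pairwise (fun a b => ¬(pyIsSubset b a = true ∧ b ≠ a)) →
    T.foldl (fun maximal cur =>
        (maximal.filter (fun m => !(pyIsSubset m cur && m != cur))) ++ [cur]) []
      = T.filter (maxB T) := by
  intro T
  induction T using List.reverseRecOn with
  | nil => simp
  | append_singleton T' c ih =>
    intro hpw
    rw [List.pairwise_append] at hpw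
    obtain ⟨hpw', -, hcross⟩ := hpw
    rw [List.foldl_append, ih hpw']
    simp only [List.foldl_cons, List.foldl_nil]
    rw [List.filter_filter]
    rw [List.filter_append]
    have hc : maxB (T' ++ [c]) c = true := by
      simp only [maxB, List.all_eq_true]
      intro q hq
      rcases List.mem_append.mp hq with hq' | hq'
      · have hX := hcross q hq' c (by simp)
        cases hsv : pyIsSubset c q with
        | false => simp
        | true =>
          have hcq : c = q := by by_contra hne; exact hX ⟨hsv, hne⟩
          subst hcq
          simp
      · have hqc : q = c := by simpa using hq'
        subst hqc
        simp [pyIsSubset]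
    simp only [List.filter_singleton, hc, cond_true]
    congr 1
    apply List.filter_congr
    intro m hm
    simp only [maxB, List.all_append, List.all_cons, List.all_nil, Bool.and_true]
    rw [Bool.and_comm]

-- elements related by strict bitwise subset are ordered by the nonneg-then-neg blocks
theorem pairwise_blocks {nonneg neg : List Int}
    (hnn : nonneg.Pairwise (· < ·)) (hng : neg.Pairwise (· < ·))
    (hnn0 : ∀ x ∈ nonneg, 0 ≤ x) (hng0 : ∀ x ∈ neg, x < 0) :
    (nonneg ++ neg).Pairwise (fun a b => ¬(pyIsSubset b a = true ∧ b ≠ a)) := by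
  rw [List.pairwise_append]
  refine ⟨?_, ?_, ?_⟩
  · refine List.Pairwise.imp_of_mem ?_ hnn
    intro a b ha hb hab
    rintro ⟨hs, hne⟩
    have := subset_le_nonneg (hnn0 b hb) (hnn0 a ha) (by simpa [pyIsSubset] using hs)
    omega
  · refine List.Pairwise.imp_of_mem ?_ hng
    intro a b ha hb hab
    rintro ⟨hs, hne⟩
    have := subset_le_neg (hng0 b hb) (hng0 a ha) (by simpa [pyIsSubset] using hs)
    omega
  · intro a ha b hb
    rintro ⟨hs, hne⟩
    exact neg_not_subset_nonneg (hng0 b hb) (hnn0 a ha) (by simpa [pyIsSubset] using hs)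

-- Pairwise ≤ + Nodup gives Pairwise <
theorem pairwise_lt_of_le_nodup {l : List Int} (h1 : l.Pairwise (· ≤ ·)) (h2 : l.Nodup) :
    l.Pairwise (· < ·) := by
  have := h1.and h2
  exact this.imp (fun ⟨hle, hne⟩ => lt_of_le_of_ne hle hne)

-- ===== VERDICT (by name: the statement is the Claim_ definition above) =====
theorem filter_maximal_spec : Claim_equal_filter_maximal := by
  intro patts _
  unfold Spec_filter_maximal
  have hA : filter_maximal patts
      = (dedupRun none (PySem.List.sorted patts (fun x => x) false)).filter (maxB patts) := by
    unfold filter_maximal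
    rw [foldA]
    simp
  have hB : filter_maximal_alt patts
      = PySem.List.sorted
          (((PySem.List.sorted ((PySem.Set.ofList patts).filter (fun x => decide (0 ≤ x))) (fun x => x) false)
            ++ (PySem.List.sorted ((PySem.Set.ofList patts).filter (fun x => decide (x < 0))) (fun x => x) false)).foldl
            (fun maximal cur =>
              (maximal.filter (fun m => !(pyIsSubset m cur && m != cur))) ++ [cur]) [])
          (fun x => x) false := rfl
  rw [hA, hB]
  -- A's side: strictly increasing list D with membership = patts, filtered by maxB patts
  have hsortpw : (PySem.List.sorted patts (fun x => x) false).Pairwise (· ≤ ·) := by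
    simpa using PySem.List.sorted_pairwise patts (fun x => x)
  obtain ⟨hDlt, hDmem⟩ := dedupRun_spec (PySem.List.sorted patts (fun x => x) false) none hsortpw (by simp)
  set D := dedupRun none (PySem.List.sorted patts (fun x => x) false) with hD
  have hDm : ∀ x, x ∈ D ↔ x ∈ patts := by
    intro x
    rw [hDmem x]
    simp [PySem.List.mem_sorted]
  -- B's side pieces
  set s := PySem.Set.ofList patts with hs
  have hsnd : s.Nodup := PySem.Set.nodup_ofList patts
  have hsm : ∀ x, x ∈ s ↔ x ∈ patts := by
    intro x; exact PySem.Set.mem_ofList patts x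
  set nonneg := PySem.List.sorted (s.filter (fun x => decide (0 ≤ x))) (fun x => x) false with hnonneg
  set neg := PySem.List.sorted (s.filter (fun x => decide (x < 0))) (fun x => x) false with hneg
  have hnnperm : nonneg.Perm (s.filter (fun x => decide (0 ≤ x))) := PySem.List.sorted_perm _ _ false
  have hngperm : neg.Perm (s.filter (fun x => decide (x < 0))) := PySem.List.sorted_perm _ _ false
  have hnn0 : ∀ x ∈ nonneg, 0 ≤ x := by
    intro x hx
    have := hnnperm.mem_iff.mp hx
    simpa using (List.mem_filter.mp this).2
  have hng0 : ∀ x ∈ neg, x < 0 := by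
    intro x hx
    have := hngperm.mem_iff.mp hx
    simpa using (List.mem_filter.mp this).2
  have hnnlt : nonneg.Pairwise (· < ·) := by
    apply pairwise_lt_of_le_nodup
    · simpa using PySem.List.sorted_pairwise (s.filter (fun x => decide (0 ≤ x))) (fun x => x)
    · exact hnnperm.nodup_iff.mpr (hsnd.filter _)
  have hnglt : neg.Pairwise (· < ·) := by
    apply pairwise_lt_of_le_nodup
    · simpa using PySem.List.sorted_pairwise (s.filter (fun x => decide (x < 0))) (fun x => x)
    · exact hngperm.nodup_iff.mpr (hsnd.filter _)
  set T := nonneg ++ neg with hT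
  have hTpw := pairwise_blocks hnnlt hnglt hnn0 hng0
  rw [greedy_spec T hTpw]
  have hTm : ∀ x, x ∈ T ↔ x ∈ patts := by
    intro x
    simp only [hT, List.mem_append]
    rw [hnnperm.mem_iff, hngperm.mem_iff]
    simp only [List.mem_filter]
    constructor
    · rintro (⟨hx, -⟩ | ⟨hx, -⟩) <;> exact (hsm x).mp hx
    · intro hx
      by_cases h0 : 0 ≤ x
      · exact Or.inl ⟨(hsm x).mpr hx, by simpa using h0⟩
      · exact Or.inr ⟨(hsm x).mpr hx, by simp; omega⟩
  have hTnd : T.Nodup := by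
    rw [hT]
    refine List.Nodup.append (hnnperm.nodup_iff.mpr (hsnd.filter _))
      (hngperm.nodup_iff.mpr (hsnd.filter _)) ?_
    intro x hx hy
    have := hnn0 x hx
    have := hng0 x hy
    omega
  -- the filtering predicates agree pointwise: any-superset over T = any-superset over patts
  have hpred : ∀ m, maxB T m = maxB patts m := by
    intro m
    rw [Bool.eq_iff_iff]
    simp only [maxB, List.all_eq_true]
    constructor
    · intro h q hq; exact h q ((hTm q).mpr hq)
    · intro h q hq; exact h q ((hTm q).mp hq)
  have hfT : T.filter (maxB T) = T.filter (maxB patts) := List.filter_congr (fun m _ => hpred m)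
  rw [hfT]
  -- both sides: sorted of the same set of maximal elements
  have hDnd : D.Nodup := hDlt.imp (fun h => ne_of_lt h)
  have hperm : (D.filter (maxB patts)).Perm (T.filter (maxB patts)) := by
    refine List.Perm.filter _ ?_
    refine (List.perm_ext_iff_of_nodup hDnd hTnd).mpr ?_
    intro x
    rw [hDm x, hTm x]
  exact (PySem.List.sorted_eq_of_perm_of_pairwise_lt _ _ (fun x => x) hperm
    (by simpa using hDlt.filter (maxB patts))).symm
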